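/- GENERATED by mk_final_copies.py from the proof of the farm's unit `start_decoder.R18` (farm:start_decoder.R18.2: Proof.lean) as the
   re-elaboration sweep compiled it — do not edit. -/
import Asan.CheckWalk
import Vorbis.Spec.StartDecoderBTest
import Vorbis.Spec.StartDecoderMid
import Vorbis.Spec.Units.start_decoder_R18
import Vorbis.Spec.Worked.start_decoder_R18_Lemmas

open X86 X86.User Asan Vorbis Vorbis.Spec Vorbis.Spec.StartDecoder

namespace Vorbis.Spec.start_decoder_R18

end Vorbis.Spec.start_decoder_R18

/-- Segment R18 of `start_decoder` (0x116784 … 0x11682c → 0x116059; C lines 4189 – 4196: one residue of the temp estimate) takes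
its entry assertion `AtR18 i` to the exit assertion `AtR17 (i + 1)`: the four walks of Lemmas.lean (`head_ok`, `mid_ok`, `dv_ok`,
`tail_ok`, composed in `seg_of_exit`) and the pure fact at the exit (`exit_ok`). -/
theorem Vorbis.Spec.Worked.start_decoder_R18_ok : Vorbis.Spec.start_decoder_R18.Statement := by
  unfold Vorbis.Spec.start_decoder_R18.Statement
  intro Lay hLay μ hμ u₀ hcode h8 h2 h4
  exact Vorbis.Spec.start_decoder_R18.seg_of_exit Lay hLay μ hμ u₀ hcode h8 h2 h4
    (Vorbis.Spec.start_decoder_R18.exit_ok u₀)
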